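-- pv_equiv track=rewrite | github.com/progettazionemauro/sheets.builder | .history/generators/import_from_html_20260329201122.py | _extract_side_column_enum_candidates
-- ===== SOURCE A (Python) =====
-- from typing import Any, Dict, List, Optional
--
-- def _extract_side_column_enum_candidates(
--     headers: List[str],
--     data_rows: List[List[str]],
-- ) -> List[str]:
--     """
--     Heuristica semplice:
--     cerca una colonna oltre gli header principali con pochi valori testuali unici.
--     """
--     if not data_rows:
--         return []
--
--     max_cols = max(len(r) for r in data_rows)
--     header_len = len(headers)
--
--     for col_idx in range(header_len, max_cols):
--         seen: List[str] = []
--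
--         for row in data_rows:
--             if len(row) <= col_idx:
--                 continue
--
--             v = row[col_idx].strip()
--             if not v:
--                 continue
--
--             if v not in seen:
--                 seen.append(v)
--
--         if 2 <= len(seen) <= 20:
--             return seen
--
--     return []
-- ===== SOURCE B (Python) =====
-- from typing import List
--
-- def _extract_side_column_enum_candidates(
--     headers: List[str],
--     data_rows: List[List[str]],
-- ) -> List[str]:
--     # One row-major pass: collect ordered unique non-empty values per side column,
--     # then pick the first column with 2..20 unique values.
--     if not data_rows:
--         return []
--
--     max_cols = max(len(r) for r in data_rows)
--     header_len = len(headers)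
--
--     uniques = {c: [] for c in range(header_len, max_cols)}
--     for row in data_rows:
--         for c in range(header_len, len(row)):
--             v = row[c].strip()
--             if v and v not in uniques[c]:
--                 uniques[c].append(v)
--
--     for c in range(header_len, max_cols):
--         vals = uniques[c]
--         if 2 <= len(vals) <= 20:
--             return vals
--
--     return []
-- ===== Notes on version B (the rewrite author's own statement) =====
-- stated objective: alternative
-- what changed: A scans all data_rows once per candidate column (column-outer loops); B makes a single row-major pass that builds a dict mapping each side-column index to its ordered list of unique non-empty stripped values, then scans column indices once to pick the first with 2-20 values.
import Mathlib
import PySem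

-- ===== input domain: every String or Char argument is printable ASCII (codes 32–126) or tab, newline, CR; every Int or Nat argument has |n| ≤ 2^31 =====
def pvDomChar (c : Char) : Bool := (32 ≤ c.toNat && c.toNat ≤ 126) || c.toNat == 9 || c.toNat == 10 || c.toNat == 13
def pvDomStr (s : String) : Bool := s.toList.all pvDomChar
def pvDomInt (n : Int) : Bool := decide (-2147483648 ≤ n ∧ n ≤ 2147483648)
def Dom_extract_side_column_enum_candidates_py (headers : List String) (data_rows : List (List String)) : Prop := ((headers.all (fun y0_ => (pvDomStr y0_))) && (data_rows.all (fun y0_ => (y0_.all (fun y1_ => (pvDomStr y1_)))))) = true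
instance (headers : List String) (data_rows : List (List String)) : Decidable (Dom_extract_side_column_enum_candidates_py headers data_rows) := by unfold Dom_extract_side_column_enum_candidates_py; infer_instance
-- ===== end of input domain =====

-- B replaces A's column-outer loops (one full scan of data_rows per candidate column) by a
-- single row-major pass accumulating per-column unique values in a dict; same return value.

-- ===== PORT A =====
-- inner 'for row in data_rows' body of A, for a fixed column index c
def pvStep (c : Int) (seen : List String) (row : List String) : List String :=
  if (row.length : Int) ≤ c then seen
  else
    match PySem.List.pyGet? row c with
    | none => seen  -- unreachable: the guard above ensures 0 ≤ c < len(row) for the indices A uses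
    | some cell =>
      let v := PySem.Str.strip cell
      if v = "" then seen
      else if v ∈ seen then seen
      else seen ++ [v]

-- A's outer loop with its early return
def pvSearchA (cols : List Int) (data_rows : List (List String)) : List String :=
  match cols with
  | [] => []
  | c :: rest =>
    let seen := data_rows.foldl (pvStep c) []
    if 2 ≤ seen.length ∧ seen.length ≤ 20 then seen
    else pvSearchA rest data_rows

def extract_side_column_enum_candidates_py (headers : List String) (data_rows : List (List String)) : List String :=
  if data_rows = [] then []
  else
    match PySem.List.max? (data_rows.map (fun r => (r.length : Int))) (fun x => x) with
    | none => []  -- unreachable: data_rows ≠ []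
    | some max_cols =>
      pvSearchA (PySem.List.pyRange (headers.length : Int) max_cols 1) data_rows

-- ===== PORT B =====
-- body of B's inner 'for c in range(header_len, len(row))' loop
def pvColUpd (row : List String) (d : PySem.Dict Int (List String)) (c : Int) : PySem.Dict Int (List String) :=
  match PySem.List.pyGet? row c with
  | none => d  -- unreachable: c < len(row) on the indices B uses
  | some cell =>
    let v := PySem.Str.strip cell
    if v = "" then d
    else
      match d.get? c with
      | none => d  -- unreachable: B's dict holds every index in range(header_len, max_cols)
      | some seen => if v ∈ seen then d else d.insert c (seen ++ [v])

-- B's final 'for c in range(header_len, max_cols)' scan with its early return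
def pvSearchB (cols : List Int) (d : PySem.Dict Int (List String)) : List String :=
  match cols with
  | [] => []
  | c :: rest =>
    let vals := d.getD c []
    if 2 ≤ vals.length ∧ vals.length ≤ 20 then vals
    else pvSearchB rest d

def extract_side_column_enum_candidates_py_alt (headers : List String) (data_rows : List (List String)) : List String :=
  if data_rows = [] then []
  else
    match PySem.List.max? (data_rows.map (fun r => (r.length : Int))) (fun x => x) with
    | none => []  -- unreachable: data_rows ≠ []
    | some max_cols =>
      let hl := (headers.length : Int)
      let d0 := (PySem.List.pyRange hl max_cols 1).foldl
        (fun d c => d.insert c ([] : List String)) PySem.Dict.empty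
      let d := data_rows.foldl
        (fun d row => (PySem.List.pyRange hl (row.length : Int) 1).foldl (pvColUpd row) d) d0
      pvSearchB (PySem.List.pyRange hl max_cols 1) d

-- ===== PRECONDITION & SPEC =====
def Spec_extract_side_column_enum_candidates_py (headers : List String) (data_rows : List (List String)) (out : List String) : Prop := out = extract_side_column_enum_candidates_py_alt headers data_rows
instance (headers : List String) (data_rows : List (List String)) (out : List String) : Decidable (Spec_extract_side_column_enum_candidates_py headers data_rows out) := by unfold Spec_extract_side_column_enum_candidates_py; infer_instance

-- ===== CLAIM (what is proved, stated in full; the proofs are below) =====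
def Claim_equal_extract_side_column_enum_candidates_py : Prop := ∀ (headers : List String) (data_rows : List (List String)), Dom_extract_side_column_enum_candidates_py headers data_rows → Spec_extract_side_column_enum_candidates_py headers data_rows (extract_side_column_enum_candidates_py headers data_rows)

-- ===== LEMMAS AND PROOFS =====

-- pvColUpd only ever writes key c; other keys keep their binding
lemma pvColUpd_get?_ne (row : List String) (d : PySem.Dict Int (List String)) (c c' : Int)
    (h : c' ≠ c) : (pvColUpd row d c).get? c' = d.get? c' := by
  unfold pvColUpd
  rcases PySem.List.pyGet? row c with _ | cell
  · rfl
  · simp only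
    split_ifs with h1
    · rfl
    · rcases hg : d.get? c with _ | seen
      · rfl
      · simp only
        split_ifs with h2
        · rfl
        · exact PySem.Dict.get?_insert_of_ne d _ h

lemma foldl_pvColUpd_not_mem (row : List String) (cs : List Int)
    (d : PySem.Dict Int (List String)) (c : Int) (h : c ∉ cs) :
    (cs.foldl (pvColUpd row) d).get? c = d.get? c := by
  induction cs generalizing d with
  | nil => rfl
  | cons c' rest ih =>
    simp only [List.foldl_cons]
    rw [ih _ (fun hm => h (List.mem_cons_of_mem _ hm)),
        pvColUpd_get?_ne row d c' c (fun he => h (List.mem_cons.2 (Or.inl he)))]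

-- one row of B's pass acts on column c exactly as one iteration of A's inner loop
lemma row_step (row : List String) (d : PySem.Dict Int (List String)) (c hl : Int)
    (h0 : 0 ≤ hl) (hc : hl ≤ c) (s : List String) (hd : d.get? c = some s) :
    ((PySem.List.pyRange hl (row.length : Int) 1).foldl (pvColUpd row) d).get? c
      = some (pvStep c s row) := by
  by_cases hlt : c < (row.length : Int)
  · -- split the range at c
    rw [PySem.List.pyRange_one_append hl c (row.length : Int) hc (le_of_lt hlt),
        PySem.List.pyRange_one_cons hlt]
    rw [List.foldl_append, List.foldl_cons]
    have hpre : c ∉ PySem.List.pyRange hl c 1 := by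
      intro hm; have := (PySem.List.mem_pyRange_one).1 hm; omega
    have hpost : c ∉ PySem.List.pyRange (c + 1) (row.length : Int) 1 := by
      intro hm; have := (PySem.List.mem_pyRange_one).1 hm; omega
    rw [foldl_pvColUpd_not_mem row _ _ c hpost]
    have hdpre : ((PySem.List.pyRange hl c 1).foldl (pvColUpd row) d).get? c = some s := by
      rw [foldl_pvColUpd_not_mem row _ _ c hpre, hd]
    generalize hD : (PySem.List.pyRange hl c 1).foldl (pvColUpd row) d = D at hdpre
    unfold pvColUpd pvStep
    have hc0 : (0:Int) ≤ c := le_trans h0 hc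
    rw [PySem.List.pyGet?_eq_some_getElem row hc0 hlt]
    simp only [not_le.2 hlt, if_false, hdpre]
    by_cases h1 : PySem.Str.strip row[c.toNat] = ""
    · simp [h1, hdpre]
    · by_cases h2 : PySem.Str.strip row[c.toNat] ∈ s
      · simp [h1, h2, hdpre]
      · simp [h1, h2, PySem.Dict.get?_insert_self]
  · -- c beyond this row: neither side changes
    have hnm : c ∉ PySem.List.pyRange hl (row.length : Int) 1 := by
      intro hm; have := (PySem.List.mem_pyRange_one).1 hm; omega
    rw [foldl_pvColUpd_not_mem row _ _ c hnm, hd]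
    unfold pvStep
    rw [if_pos (not_lt.1 hlt)]

-- B's whole row pass tracked at one column = A's inner loop at that column
lemma rows_fold (rows : List (List String)) (d : PySem.Dict Int (List String))
    (c hl : Int) (h0 : 0 ≤ hl) (hc : hl ≤ c) (s : List String) (hd : d.get? c = some s) :
    (rows.foldl (fun d row =>
        (PySem.List.pyRange hl (row.length : Int) 1).foldl (pvColUpd row) d) d).get? c
      = some (rows.foldl (pvStep c) s) := by
  induction rows generalizing d s with
  | nil => simpa using hd
  | cons row rest ih =>
    simp only [List.foldl_cons]
    exact ih _ _ (row_step row d c hl h0 hc s hd)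

lemma foldl_insert_nil_not_mem (cs : List Int) (d : PySem.Dict Int (List String)) (c : Int)
    (h : c ∉ cs) :
    (cs.foldl (fun d c => d.insert c ([] : List String)) d).get? c = d.get? c := by
  induction cs generalizing d with
  | nil => rfl
  | cons c' rest ih =>
    simp only [List.foldl_cons]
    rw [ih _ (fun hm => h (List.mem_cons_of_mem _ hm)),
        PySem.Dict.get?_insert_of_ne d _ (fun he => h (List.mem_cons.2 (Or.inl he)))]

lemma init_get? (cs : List Int) (d : PySem.Dict Int (List String)) (c : Int) (h : c ∈ cs) :
    (cs.foldl (fun d c => d.insert c ([] : List String)) d).get? c = some [] := by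
  induction cs generalizing d with
  | nil => cases h
  | cons c' rest ih =>
    simp only [List.foldl_cons]
    by_cases hm : c ∈ rest
    · exact ih _ hm
    · have hcc : c = c' := by rcases List.mem_cons.1 h with h | h; exact h; exact absurd h hm
      subst hcc
      rw [foldl_insert_nil_not_mem rest _ c hm]
      exact PySem.Dict.get?_insert_self d c []

lemma search_eq (cols : List Int) (rows : List (List String)) (d : PySem.Dict Int (List String))
    (h : ∀ c ∈ cols, d.getD c [] = rows.foldl (pvStep c) []) :
    pvSearchB cols d = pvSearchA cols rows := by
  induction cols with
  | nil => rfl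
  | cons c rest ih =>
    unfold pvSearchA pvSearchB
    rw [h c List.mem_cons_self]
    exact if_congr Iff.rfl rfl (ih (fun c' hm => h c' (List.mem_cons_of_mem _ hm)))

-- ===== VERDICT (by name: the statement is the Claim_ definition above) =====
theorem extract_side_column_enum_candidates_py_spec : Claim_equal_extract_side_column_enum_candidates_py := by
  intro headers data_rows _
  unfold Spec_extract_side_column_enum_candidates_py
  unfold extract_side_column_enum_candidates_py extract_side_column_enum_candidates_py_alt
  split_ifs with hnil
  · rfl
  · rcases hmx : PySem.List.max? (data_rows.map (fun r => (r.length : Int))) (fun x => x) with _ | mc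
    · simp only [hmx]
    · simp only [hmx]
      refine (search_eq _ data_rows _ ?_).symm
      intro c hc
      have hm := (PySem.List.mem_pyRange_one).1 hc
      have h0 : (0:Int) ≤ (headers.length : Int) := by positivity
      have hget := rows_fold data_rows _ c (headers.length : Int) h0 hm.1 []
        (init_get? _ PySem.Dict.empty c hc)
      rw [PySem.Dict.getD_eq_get?_getD, hget]
      rfl
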